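-- pv_equiv track=rewrite | github.com/manuelafba/programacao-I | 1ª avaliação/lista 1 contagem/ex06.py | calcular_quantidade_itens_backlog
-- ===== SOURCE A (Python) =====
-- def calcular_quantidade_itens_backlog(lista_complexidade, velocidade):
--     soma_complexidades = 0
--     cont = 0
--
--     for item in lista_complexidade:
--         if soma_complexidades + item <= velocidade:
--             soma_complexidades += item
--             cont += 1
--         else:
--             break
--
--     return cont
-- ===== SOURCE B (Python) =====
-- def calcular_quantidade_itens_backlog(lista_complexidade, velocidade):
--     # Two phases: materialise all running prefix sums, then the answer is the
--     # index of the first prefix sum exceeding the budget (or the full length).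
--     prefix = []
--     s = 0
--     for x in lista_complexidade:
--         s += x
--         prefix.append(s)
--     return next((i for i, s in enumerate(prefix) if s > velocidade), len(prefix))
-- ===== Notes on version B (the rewrite author's own statement) =====
-- stated objective: alternative
-- what changed: Instead of a single early-exit loop with a conditionally updated accumulator and counter, B first materialises the whole prefix-sum list and then returns the index of the first prefix sum exceeding the budget (defaulting to the list length); it trades the early exit for a clean two-phase sum-then-search decomposition.
import Mathlib
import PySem

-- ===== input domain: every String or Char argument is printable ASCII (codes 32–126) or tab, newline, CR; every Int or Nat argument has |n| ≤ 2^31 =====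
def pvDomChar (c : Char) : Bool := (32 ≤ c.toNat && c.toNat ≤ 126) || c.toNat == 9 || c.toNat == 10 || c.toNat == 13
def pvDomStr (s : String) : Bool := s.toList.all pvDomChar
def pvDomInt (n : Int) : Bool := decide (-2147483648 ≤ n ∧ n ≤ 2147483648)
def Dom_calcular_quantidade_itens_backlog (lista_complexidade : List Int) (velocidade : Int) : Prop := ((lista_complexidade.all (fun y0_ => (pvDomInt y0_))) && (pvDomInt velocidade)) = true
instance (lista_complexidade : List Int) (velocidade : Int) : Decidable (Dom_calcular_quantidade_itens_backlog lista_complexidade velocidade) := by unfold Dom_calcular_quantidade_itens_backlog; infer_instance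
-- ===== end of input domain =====

-- B replaces A's early-exit conditional accumulator by a two-phase prefix-sums-then-first-exceed-index algorithm (objective: alternative).


-- ===== PORT A =====
-- Loop of A: state (soma_complexidades, cont), break on the else branch.
def pvALoop : List Int → Int → Int → Int → Int
  | [], _soma, _vel, cont => cont
  | item :: rest, soma, vel, cont =>
      if soma + item ≤ vel then pvALoop rest (soma + item) vel (cont + 1) else cont

def calcular_quantidade_itens_backlog (lista_complexidade : List Int) (velocidade : Int) : Int :=
  pvALoop lista_complexidade 0 velocidade 0

-- ===== PORT B =====
-- B phase 1: the running prefix sums (soma carried as B's variable s).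
def pvPrefixSums : List Int → Int → List Int
  | [], _ => []
  | x :: xs, s => (s + x) :: pvPrefixSums xs (s + x)

-- B phase 2: index of the first prefix sum exceeding the budget, else length.
def calcular_quantidade_itens_backlog_alt (lista_complexidade : List Int) (velocidade : Int) : Int :=
  let sums := pvPrefixSums lista_complexidade 0
  match sums.findIdx? (fun s => decide (velocidade < s)) with
  | some i => (i : Int)
  | none => (sums.length : Int)

-- ===== PRECONDITION & SPEC =====
def Spec_calcular_quantidade_itens_backlog (lista_complexidade : List Int) (velocidade : Int) (out : Int) : Prop := out = calcular_quantidade_itens_backlog_alt lista_complexidade velocidade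
instance (lista_complexidade : List Int) (velocidade : Int) (out : Int) : Decidable (Spec_calcular_quantidade_itens_backlog lista_complexidade velocidade out) := by unfold Spec_calcular_quantidade_itens_backlog; infer_instance

-- ===== CLAIM (what is proved, stated in full; the proofs are below) =====
def Claim_equal_calcular_quantidade_itens_backlog : Prop := ∀ (lista_complexidade : List Int) (velocidade : Int), Dom_calcular_quantidade_itens_backlog lista_complexidade velocidade → Spec_calcular_quantidade_itens_backlog lista_complexidade velocidade (calcular_quantidade_itens_backlog lista_complexidade velocidade)

-- ===== LEMMAS AND PROOFS =====

-- ===== VERDICT (by name: the statement is the Claim_ definition above) =====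
lemma pvALoop_eq_search (vel : Int) (xs : List Int) : ∀ (soma cont : Int),
    pvALoop xs soma vel cont =
      cont + (match (pvPrefixSums xs soma).findIdx? (fun s => decide (vel < s)) with
              | some i => (i : Int)
              | none => ((pvPrefixSums xs soma).length : Int)) := by
  induction xs with
  | nil => intro soma cont; simp [pvALoop, pvPrefixSums]
  | cons x xs ih =>
      intro soma cont
      simp only [pvALoop, pvPrefixSums, List.findIdx?_cons]
      by_cases h : soma + x ≤ vel
      · rw [if_pos h]
        have hd : decide (vel < soma + x) = false := by simp; omega
        rw [hd, ih (soma + x) (cont + 1)]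
        rcases hr : (pvPrefixSums xs (soma + x)).findIdx? (fun s => decide (vel < s)) with _ | i
        · simp only [Option.map_none, List.length_cons]
          push_cast; ring
        · simp only [Option.map_some]
          push_cast; ring
      · rw [if_neg h]
        have hd : decide (vel < soma + x) = true := by simp; omega
        rw [hd]
        simp

theorem calcular_quantidade_itens_backlog_spec : Claim_equal_calcular_quantidade_itens_backlog := by
  intro xs v _
  unfold Spec_calcular_quantidade_itens_backlog calcular_quantidade_itens_backlog
    calcular_quantidade_itens_backlog_alt
  rw [pvALoop_eq_search]
  simp
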